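-- pv_equiv track=rewrite | github.com/nodewee/mm-bot-boilerplate | thebot/commander/utils/command.py | parse_options_and_arguments
-- ===== SOURCE A (Python) =====
-- def parse_options_and_arguments(text: str):
--     """return options, arguments"""
--     in_quotation = False
--
--     options = []
--     arguments = []
--
--     field = ""
--     fields = []
--     for char in text:
--         if char == '"':
--             in_quotation = not in_quotation
--             continue
--         elif char == " ":
--             if in_quotation:
--                 field += " "
--                 continue
--             else:
--                 fields.append(field)
--                 field = ""
--         else:
--             field += char
--     if field:
--         fields.append(field)
--
--     for field in fields:
--         if field.startswith("-"):
--             options.append(field.lstrip("-"))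
--         else:
--             arguments.append(field)
--
--     return options, arguments
-- ===== SOURCE B (Python) =====
-- def parse_options_and_arguments(text: str):
--     """return options, arguments"""
--     options = []
--     arguments = []
--
--     field = ""
--     fields = []
--     inside = False
--     for part in text.split('"'):
--         if inside:
--             field += part
--         else:
--             pieces = part.split(' ')
--             field += pieces[0]
--             for piece in pieces[1:]:
--                 fields.append(field)
--                 field = piece
--         inside = not inside
--     if field:
--         fields.append(field)
--
--     for f in fields:
--         if f.startswith("-"):
--             options.append(f.lstrip("-"))
--         else:
--             arguments.append(f)
--
--     return options, arguments
-- ===== Notes on version B (the rewrite author's own statement) =====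
-- stated objective: faster
-- what changed: B replaces A's character-by-character quote-state machine with whole-segment splitting (on the quote character, then on spaces for the outside segments), moving the per-character work into C-level str.split calls.
import Mathlib
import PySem

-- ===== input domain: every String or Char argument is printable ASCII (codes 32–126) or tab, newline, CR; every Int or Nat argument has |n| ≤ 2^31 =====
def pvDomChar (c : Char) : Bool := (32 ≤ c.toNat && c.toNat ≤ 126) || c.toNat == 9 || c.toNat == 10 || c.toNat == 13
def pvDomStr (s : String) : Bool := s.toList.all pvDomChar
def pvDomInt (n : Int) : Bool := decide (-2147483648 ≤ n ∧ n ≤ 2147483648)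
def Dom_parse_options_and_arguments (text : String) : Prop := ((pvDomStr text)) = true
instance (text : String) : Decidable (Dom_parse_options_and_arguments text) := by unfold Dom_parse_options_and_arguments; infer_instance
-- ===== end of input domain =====

-- B re-implements A by splitting on the quote character and on spaces instead of A's per-character state machine; same return value, measured constant-factor faster (C-level str.split).

-- shared second phase (identical in both Pythons): classify fields into options/arguments
-- field.startswith("-") ↔ head is '-'; field.lstrip("-") = drop leading '-' chars (exact hand port)
def pvClassify (fields : List (List Char)) : List String × List String :=
  fields.foldl
    (fun acc f =>
      match f with
      | '-' :: _ => (acc.1 ++ [String.ofList (f.dropWhile (· == '-'))], acc.2)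
      | _ => (acc.1, acc.2 ++ [String.ofList f]))
    ([], [])

-- ===== PORT A =====
-- one step of A's for-char loop; state = (in_quotation, field, fields)
def pvStepA (st : Bool × List Char × List (List Char)) (c : Char) :
    Bool × List Char × List (List Char) :=
  if c = '"' then (!st.1, st.2.1, st.2.2)
  else if c = ' ' then
    (if st.1 then (st.1, st.2.1 ++ [' '], st.2.2) else (st.1, [], st.2.2 ++ [st.2.1]))
  else (st.1, st.2.1 ++ [c], st.2.2)

def parse_options_and_arguments (text : String) : List String × List String :=
  pvClassify
    (if (text.toList.foldl pvStepA (false, [], [])).2.1 = []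
     then (text.toList.foldl pvStepA (false, [], [])).2.2
     else (text.toList.foldl pvStepA (false, [], [])).2.2
          ++ [(text.toList.foldl pvStepA (false, [], [])).2.1])

-- ===== PORT B =====
-- inner loop over pieces[1:]: finalize the current field, start a new one
def pvInnerB (st : List Char × List (List Char)) (p : List Char) :
    List Char × List (List Char) :=
  (p, st.2 ++ [st.1])

-- one step of B's for-part loop; state = (inside, field, fields)
def pvStepB (st : Bool × List Char × List (List Char)) (part : List Char) :
    Bool × List Char × List (List Char) :=
  if st.1 then (!st.1, st.2.1 ++ part, st.2.2)
  else
    let ps := part.splitOn ' '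
    let st' := ps.tail.foldl pvInnerB (st.2.1 ++ ps.headI, st.2.2)
    (!st.1, st'.1, st'.2)

def parse_options_and_arguments_alt (text : String) : List String × List String :=
  pvClassify
    (if ((text.toList.splitOn '"').foldl pvStepB (false, [], [])).2.1 = []
     then ((text.toList.splitOn '"').foldl pvStepB (false, [], [])).2.2
     else ((text.toList.splitOn '"').foldl pvStepB (false, [], [])).2.2
          ++ [((text.toList.splitOn '"').foldl pvStepB (false, [], [])).2.1])

-- ===== PRECONDITION & SPEC =====
def Spec_parse_options_and_arguments (text : String) (out : List String × List String) : Prop := out = parse_options_and_arguments_alt text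
instance (text : String) (out : List String × List String) : Decidable (Spec_parse_options_and_arguments text out) := by unfold Spec_parse_options_and_arguments; infer_instance

-- ===== CLAIM (what is proved, stated in full; the proofs are below) =====
def Claim_equal_parse_options_and_arguments : Prop := ∀ (text : String), Dom_parse_options_and_arguments text → Spec_parse_options_and_arguments text (parse_options_and_arguments text)

-- ===== LEMMAS AND PROOFS =====

-- join the parts back with '"' separators (proof-only helper)
def pvJoinQ : List (List Char) → List Char
  | [] => []
  | [p] => p
  | p :: q :: ps => p ++ '"' :: pvJoinQ (q :: ps)

theorem pvJoinQ_splitOn (l : List Char) : pvJoinQ (l.splitOn '"') = l := by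
  induction l with
  | nil => rfl
  | cons c l ih =>
    unfold List.splitOn at *
    rw [List.splitOnP_cons]
    rcases h : List.splitOnP (· == '"') l with - | ⟨h1, t1⟩
    · exact absurd h (List.splitOnP_ne_nil _ l)
    · rw [h] at ih
      by_cases hc : c = '"'
      · simp only [hc, beq_self_eq_true, if_pos]
        simpa [pvJoinQ] using ih
      · simp only [beq_iff_eq, hc, if_neg, List.modifyHead_cons, not_false_iff]
        cases t1 <;> simpa [pvJoinQ] using ih

theorem pvSplitOn_no_quote (l : List Char) :
    ∀ p ∈ l.splitOn '"', '"' ∉ p := by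
  induction l with
  | nil => intro p hp; simp [List.splitOn, List.splitOnP_nil] at hp; simp [hp]
  | cons c l ih =>
    intro p hp
    unfold List.splitOn at *
    rw [List.splitOnP_cons] at hp
    by_cases hc : c = '"'
    · simp only [hc, beq_self_eq_true, if_pos, List.mem_cons] at hp
      rcases hp with rfl | hp
      · simp
      · exact ih p hp
    · simp only [beq_iff_eq, hc, if_neg, not_false_iff] at hp
      rcases h : List.splitOnP (· == '"') l with - | ⟨h1, t1⟩
      · exact absurd h (List.splitOnP_ne_nil _ l)
      · rw [h, List.modifyHead_cons, List.mem_cons] at hp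
        rcases hp with rfl | hp
        · intro hmem
          rcases List.mem_cons.1 hmem with h' | h'
          · exact hc h'.symm
          · exact ih h1 (h ▸ List.mem_cons_self) h'
        · exact ih p (h ▸ List.mem_cons_of_mem _ hp)

-- A's loop over an inside-quote, quote-free segment appends the whole segment to the field
theorem pvFoldA_inside (p : List Char) (hq : '"' ∉ p) (f : List Char)
    (fs : List (List Char)) :
    p.foldl pvStepA (true, f, fs) = (true, f ++ p, fs) := by
  induction p generalizing f with
  | nil => simp
  | cons c p ih =>
    have hc : c ≠ '"' := fun h => hq (h ▸ List.mem_cons_self)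
    have hq' : '"' ∉ p := fun h => hq (List.mem_cons_of_mem _ h)
    by_cases hs : c = ' ' <;>
      simp [pvStepA, hc, hs, ih hq', List.append_assoc]

-- A's loop over an outside-quote, quote-free segment equals B's split-on-space processing
theorem pvFoldA_outside (p : List Char) (hq : '"' ∉ p) (f : List Char)
    (fs : List (List Char)) :
    p.foldl pvStepA (false, f, fs) =
      (false, ((p.splitOn ' ').tail.foldl pvInnerB (f ++ (p.splitOn ' ').headI, fs)).1,
        ((p.splitOn ' ').tail.foldl pvInnerB (f ++ (p.splitOn ' ').headI, fs)).2) := by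
  induction p generalizing f fs with
  | nil => simp [List.splitOn, List.splitOnP_nil]
  | cons c p ih =>
    have hc : c ≠ '"' := fun h => hq (h ▸ List.mem_cons_self)
    have hq' : '"' ∉ p := fun h => hq (List.mem_cons_of_mem _ h)
    rcases h : p.splitOn ' ' with - | ⟨h1, t1⟩
    · exact absurd h (List.splitOnP_ne_nil _ p)
    · by_cases hs : c = ' '
      · have : (c :: p).splitOn ' ' = [] :: p.splitOn ' ' := by
          simp [List.splitOn, List.splitOnP_cons, hs]
        rw [this, h]
        simp only [List.headI, List.tail, List.append_nil, List.foldl_cons]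
        rw [show pvStepA (false, f, fs) c = (false, [], fs ++ [f]) by
          simp [pvStepA, hs]]
        rw [ih hq' [] (fs ++ [f]), h]
        simp [pvInnerB]
      · have : (c :: p).splitOn ' ' = (c :: h1) :: t1 := by
          simp [List.splitOn, List.splitOnP_cons, hs]
          unfold List.splitOn at h
          simp [h]
        rw [this]
        simp only [List.headI, List.tail, List.foldl_cons]
        rw [show pvStepA (false, f, fs) c = (false, f ++ [c], fs) by
          simp [pvStepA, hc, hs]]
        rw [ih hq' (f ++ [c]) fs, h]
        simp [List.headI, List.tail, List.append_assoc]

-- main correspondence: A's char fold over the rejoined parts ≡ B's fold over the parts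
theorem pvMain (parts : List (List Char)) (hq : ∀ p ∈ parts, '"' ∉ p)
    (b : Bool) (f : List Char) (fs : List (List Char)) :
    ((pvJoinQ parts).foldl pvStepA (b, f, fs)).2 =
      (parts.foldl pvStepB (b, f, fs)).2 := by
  induction parts generalizing b f fs with
  | nil => rfl
  | cons p ps ih =>
    have hqp : '"' ∉ p := hq p List.mem_cons_self
    have hqs : ∀ q ∈ ps, '"' ∉ q := fun q hqm => hq q (List.mem_cons_of_mem _ hqm)
    cases ps with
    | nil =>
      cases b
      · rw [show pvJoinQ [p] = p from rfl]
        rw [pvFoldA_outside p hqp f fs]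
        simp [pvStepB]
      · rw [show pvJoinQ [p] = p from rfl]
        rw [pvFoldA_inside p hqp f fs]
        simp [pvStepB]
    | cons q qs =>
      rw [show pvJoinQ (p :: q :: qs) = p ++ '"' :: pvJoinQ (q :: qs) from rfl,
        List.foldl_append]
      cases b
      · rw [pvFoldA_outside p hqp f fs]
        rw [List.foldl_cons, show ∀ x y, pvStepA (false, x, y) '"' = (true, x, y) by
          intro x y; simp [pvStepA]]
        rw [ih hqs]
        simp only [List.foldl_cons]
        rw [show ∀ st, pvStepB (false, st) p
              = (true, ((p.splitOn ' ').tail.foldl pvInnerB (st.1 ++ (p.splitOn ' ').headI, st.2)).1,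
                  ((p.splitOn ' ').tail.foldl pvInnerB (st.1 ++ (p.splitOn ' ').headI, st.2)).2) by
          intro st; simp [pvStepB]]
      · rw [pvFoldA_inside p hqp f fs]
        rw [List.foldl_cons, show ∀ x y, pvStepA (true, x, y) '"' = (false, x, y) by
          intro x y; simp [pvStepA]]
        rw [ih hqs]
        simp only [List.foldl_cons]
        rw [show pvStepB (true, f, fs) p = (false, f ++ p, fs) by simp [pvStepB]]

-- ===== VERDICT (by name: the statement is the Claim_ definition above) =====
theorem parse_options_and_arguments_spec : Claim_equal_parse_options_and_arguments := by
  intro text _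
  unfold Spec_parse_options_and_arguments
  unfold parse_options_and_arguments parse_options_and_arguments_alt
  have h := pvMain (text.toList.splitOn '"') (pvSplitOn_no_quote text.toList)
    false [] []
  rw [pvJoinQ_splitOn] at h
  rw [h]
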